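-- pv_equiv track=rewrite | github.com/davidkmarzagao/polyAGM | smiles_to_grakel_graphs.py | separate_monomers
-- ===== SOURCE A (Python) =====
-- def separate_monomers(smile):
--     split = []
--     block = ''
--     for char in smile:
--         block += char
--         if char == '}':
--             split.append(block)
--             block = ''
--     return split
-- ===== SOURCE B (Python) =====
-- def separate_monomers(smile):
--     parts = smile.split('}')
--     return [p + '}' for p in parts[:-1]]
-- ===== Notes on version B (the rewrite author's own statement) =====
-- stated objective: simpler
-- what changed: Replaces the character-by-character accumulation loop with a single str.split on the delimiter plus a comprehension re-appending it to every segment except the trailing fragment.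
import Mathlib
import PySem

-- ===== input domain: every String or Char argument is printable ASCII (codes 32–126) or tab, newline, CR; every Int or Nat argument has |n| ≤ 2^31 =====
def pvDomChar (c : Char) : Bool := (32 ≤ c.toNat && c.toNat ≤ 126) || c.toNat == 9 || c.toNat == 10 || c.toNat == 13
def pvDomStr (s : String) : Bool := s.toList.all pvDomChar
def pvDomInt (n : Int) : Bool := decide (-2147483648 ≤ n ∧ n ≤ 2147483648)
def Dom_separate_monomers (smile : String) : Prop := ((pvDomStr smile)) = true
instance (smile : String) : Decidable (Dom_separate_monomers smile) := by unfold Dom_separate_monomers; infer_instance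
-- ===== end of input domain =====

-- B replaces A's char-by-char accumulation loop with one split on '}' plus a
-- comprehension re-appending the delimiter (objective: simpler).


-- ===== PORT A =====
-- A's loop body: extend `block` by the char; on '}' append the block to `split` and reset.
def pvStepA (st : List (List Char) × List Char) (c : Char) : List (List Char) × List Char :=
  let block := st.2 ++ [c]
  if c = '}' then (st.1 ++ [block], []) else (st.1, block)

def separate_monomers (smile : String) : List String :=
  ((smile.toList.foldl pvStepA ([], [])).1).map String.ofList

-- ===== PORT B =====
-- B: smile.split('}') (single-char sep = List.splitOn), drop the trailing
-- fragment, re-append '}' to each kept segment.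
def separate_monomers_alt (smile : String) : List String :=
  ((smile.toList.splitOn '}').dropLast).map (fun p => String.ofList (p ++ ['}']))

-- ===== PRECONDITION & SPEC =====
def Spec_separate_monomers (smile : String) (out : List String) : Prop := out = separate_monomers_alt smile
instance (smile : String) (out : List String) : Decidable (Spec_separate_monomers smile out) := by unfold Spec_separate_monomers; infer_instance

-- ===== CLAIM (what is proved, stated in full; the proofs are below) =====
def Claim_equal_separate_monomers : Prop := ∀ (smile : String), Dom_separate_monomers smile → Spec_separate_monomers smile (separate_monomers smile)

-- ===== LEMMAS AND PROOFS =====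

theorem pvStepA_sep (st : List (List Char) × List Char) :
    pvStepA st '}' = (st.1 ++ [st.2 ++ ['}']], []) := by
  simp [pvStepA]

theorem pvStepA_other (st : List (List Char) × List Char) (c : Char) (hc : c ≠ '}') :
    pvStepA st c = (st.1, st.2 ++ [c]) := by
  simp [pvStepA, hc]

theorem pv_splitOnP_no_sep (block : List Char) (h : '}' ∉ block) :
    block.splitOnP (· == '}') = [block] := by
  induction block with
  | nil => simp [List.splitOnP_nil]
  | cons c cs ih =>
    simp only [List.mem_cons, not_or] at h
    rw [List.splitOnP_cons, if_neg (by simpa using Ne.symm h.1), ih h.2]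
    rfl

theorem pv_splitOnP_sep_append (block cs : List Char) (h : '}' ∉ block) :
    (block ++ '}' :: cs).splitOnP (· == '}') = block :: cs.splitOnP (· == '}') := by
  induction block with
  | nil => simp [List.splitOnP_cons]
  | cons b bs ih =>
    simp only [List.mem_cons, not_or] at h
    rw [List.cons_append, List.splitOnP_cons, if_neg (by simpa using Ne.symm h.1), ih h.2]
    rfl

theorem pv_fold_spec (cs : List Char) (split : List (List Char)) (block : List Char)
    (h : '}' ∉ block) :
    (cs.foldl pvStepA (split, block)).1
    = split ++ (((block ++ cs).splitOnP (· == '}')).dropLast).map (· ++ ['}']) := by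
  induction cs generalizing split block with
  | nil =>
    simp [pv_splitOnP_no_sep block h]
  | cons c cs ih =>
    by_cases hc : c = '}'
    · subst hc
      rw [List.foldl_cons, pvStepA_sep, ih (split ++ [block ++ ['}']]) [] (by simp),
        pv_splitOnP_sep_append block cs h,
        List.dropLast_cons_of_ne_nil (List.splitOnP_ne_nil _ _)]
      simp
    · rw [List.foldl_cons, pvStepA_other _ _ hc,
        ih split (block ++ [c]) (by simp [h, Ne.symm hc])]
      simp

-- ===== VERDICT (by name: the statement is the Claim_ definition above) =====
theorem separate_monomers_spec : Claim_equal_separate_monomers := by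
  intro smile _
  unfold Spec_separate_monomers separate_monomers separate_monomers_alt
  rw [show (List.splitOn '}' smile.toList) = smile.toList.splitOnP (· == '}') from rfl,
    pv_fold_spec smile.toList [] [] (by simp)]
  simp [List.map_map, Function.comp_def]
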